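-- pv_equiv track=rewrite | github.com/VishvaMangukiya/Basic-python-tasks | More Python Programs/sumOfFactors.py | min_sum_of_factors
-- ===== SOURCE A (Python) =====
-- import math
--
-- def min_sum_of_factors(n):
--     if n <= 0:
--         return 0
--
--     min_sum = float('inf')
--
--     for i in range(1, int(math.sqrt(n)) + 1):
--         if n % i == 0:
--             pair = n // i
--             current_sum = i + pair
--             if current_sum < min_sum:
--                 min_sum = current_sum
--
--     return min_sum
-- ===== SOURCE B (Python) =====
-- import math
--
-- def min_sum_of_factors(n):
--     if n <= 0:
--         return 0
--     for i in range(math.isqrt(n), 0, -1):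
--         if n % i == 0:
--             return i + n // i
-- ===== Notes on version B (the rewrite author's own statement) =====
-- stated objective: alternative
-- what changed: B drops the min accumulator: it scans i downward from isqrt(n) and returns i + n//i at the first divisor found (early exit), correct because i + n//i is antitone on divisors up to sqrt(n).
import Mathlib
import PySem

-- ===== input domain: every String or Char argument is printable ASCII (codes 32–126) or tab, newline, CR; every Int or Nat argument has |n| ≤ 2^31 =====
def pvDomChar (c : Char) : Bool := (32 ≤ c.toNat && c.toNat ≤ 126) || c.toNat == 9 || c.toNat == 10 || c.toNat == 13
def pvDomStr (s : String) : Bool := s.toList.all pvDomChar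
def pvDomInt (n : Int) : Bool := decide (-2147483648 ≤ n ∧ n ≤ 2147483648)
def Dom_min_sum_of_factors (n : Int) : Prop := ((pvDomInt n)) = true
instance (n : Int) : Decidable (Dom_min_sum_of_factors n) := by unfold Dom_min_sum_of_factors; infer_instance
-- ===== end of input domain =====

-- B drops A's min accumulator: it scans downward from isqrt(n) and returns at the first
-- divisor, correct because i + n//i is antitone on divisors i ≤ √n; same O(√n) cost.
-- int(math.sqrt(n)) is ported as Int.sqrt: exact for 0 ≤ n ≤ 2^31 (double sqrt is
-- correctly rounded and the error is far below the gap to the next integer there).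

-- ===== PORT A =====
-- A's loop body (min_sum is float('inf') initially; modelled as Option Int, none = inf,
-- under which 'current_sum < min_sum' is always true)
def stepA (n : Int) (min_sum : Option Int) (i : Int) : Option Int :=
  if PySem.Int.mod n i = 0 then
    let pair := PySem.Int.floordiv n i
    let current_sum := i + pair
    match min_sum with
    | none => some current_sum
    | some m => if current_sum < m then some current_sum else some m
  else min_sum

def min_sum_of_factors (n : Int) : Int :=
  if n ≤ 0 then 0
  else
    match (PySem.List.pyRange 1 (Int.sqrt n + 1) 1).foldl (stepA n) none with
    | some v => v
    | none => 0   -- unreachable for n > 0 (i = 1 divides; A would return float('inf') here)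

-- ===== PORT B =====
-- the downward scan 'for i in range(isqrt(n), 0, -1): if n % i == 0: return i + n // i'
def altGo (n : Int) : Nat → Int
  | 0 => 0   -- loop fell through: unreachable for n > 0 (Python B would return None)
  | Nat.succ i =>
      let ii : Int := (i : Int) + 1
      if PySem.Int.mod n ii = 0 then ii + PySem.Int.floordiv n ii else altGo n i

def min_sum_of_factors_alt (n : Int) : Int :=
  if n ≤ 0 then 0 else altGo n (Int.sqrt n).toNat

-- ===== PRECONDITION & SPEC =====
def Spec_min_sum_of_factors (n : Int) (out : Int) : Prop := out = min_sum_of_factors_alt n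
instance (n : Int) (out : Int) : Decidable (Spec_min_sum_of_factors n out) := by unfold Spec_min_sum_of_factors; infer_instance

-- ===== CLAIM (what is proved, stated in full; the proofs are below) =====
def Claim_equal_min_sum_of_factors : Prop := ∀ (n : Int), Dom_min_sum_of_factors n → Spec_min_sum_of_factors n (min_sum_of_factors n)

-- ===== LEMMAS AND PROOFS =====

-- i + n/i is antitone in i on divisors of n with i ≤ j ≤ √n
theorem pair_sum_antitone (n i j : Int) (hi : 0 < i) (hij : i ≤ j)
    (hdi : i ∣ n) (hdj : j ∣ n) (hj2 : j * j ≤ n) :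
    j + n / j ≤ i + n / i := by
  obtain ⟨a, ha⟩ := hdi
  obtain ⟨b, hb⟩ := hdj
  have hj : 0 < j := lt_of_lt_of_le hi hij
  have hda : n / i = a := by rw [ha, Int.mul_ediv_cancel_left _ (by omega)]
  have hdb : n / j = b := by rw [hb, Int.mul_ediv_cancel_left _ (by omega)]
  rw [hda, hdb]
  -- (a - b) * i * j = n * (j - i) ≥ i * j * (j - i), so a - b ≥ j - i
  nlinarith [mul_pos hi hj, sq_nonneg (i - j), sq_nonneg (a - b)]

-- the loop invariant: after scanning 1..k (k ≤ √n), A's running minimum is exactly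
-- B's value for fuel k, and that value is i₀ + n/i₀ for some divisor i₀ ≤ k
theorem loop_inv (n : Int) (hn : 0 < n) (k : Nat) (hk : 1 ≤ k)
    (hkn : (k : Int) * (k : Int) ≤ n) :
    (PySem.List.pyRange 1 ((k : Int) + 1) 1).foldl (stepA n) none = some (altGo n k)
    ∧ ∃ i0 : Int, 1 ≤ i0 ∧ i0 ≤ (k : Int) ∧ i0 ∣ n ∧ altGo n k = i0 + n / i0 := by
  induction k with
  | zero => omega
  | succ k ih =>
    rcases Nat.eq_or_lt_of_le hk with h1 | h1
    · -- k + 1 = 1 : the range is [1] and 1 divides n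
      have hk0 : k = 0 := by omega
      subst hk0
      have hmod : PySem.Int.mod n 1 = 0 := by
        rw [PySem.Int.mod_eq_zero_iff_dvd]; exact one_dvd n
      have hdiv : PySem.Int.floordiv n 1 = n / 1 :=
        PySem.Int.floordiv_eq_ediv_of_pos (by omega)
      constructor
      · show (PySem.List.pyRange 1 2 1).foldl (stepA n) none = _
        rw [show (2 : Int) = 1 + 1 by norm_num, PySem.List.pyRange_one_singleton]
        simp [stepA, altGo]
      · exact ⟨1, le_refl 1, by norm_num, one_dvd n, by simp [altGo]⟩
    · -- k ≥ 1 : split off the last element k+1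
      have hk1 : 1 ≤ k := by omega
      have hkn' : (k : Int) * (k : Int) ≤ n := by push_cast at hkn ⊢; nlinarith
      obtain ⟨hfold, i0, hi0_1, hi0_le, hi0_dvd, hval⟩ := ih hk1 hkn'
      have hsplit : PySem.List.pyRange 1 ((k : Int) + 1 + 1) 1
          = PySem.List.pyRange 1 ((k : Int) + 1) 1 ++ [(k : Int) + 1] := by
        exact_mod_cast PySem.List.pyRange_one_succ_right (a := 1) (b := (k : Int) + 1) (by push_cast; omega)
      rw [show (((k + 1 : Nat) : Int) + 1) = ((k : Int) + 1 + 1) by push_cast; ring, hsplit,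
        List.foldl_append, hfold]
      by_cases hdvd : ((k : Int) + 1) ∣ n
      · have hmod : PySem.Int.mod n ((k : Int) + 1) = 0 := by
          rw [PySem.Int.mod_eq_zero_iff_dvd]; exact hdvd
        have hdiv : PySem.Int.floordiv n ((k : Int) + 1) = n / ((k : Int) + 1) :=
          PySem.Int.floordiv_eq_ediv_of_pos (by push_cast; omega)
        have hle : ((k : Int) + 1) + n / ((k : Int) + 1) ≤ i0 + n / i0 := by
          apply pair_sum_antitone n i0 ((k : Int) + 1) (by omega) (by omega) hi0_dvd hdvd
          push_cast at hkn; nlinarith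
        have haltB : altGo n (k + 1) = ((k : Int) + 1) + n / ((k : Int) + 1) := by
          simp [altGo, hdvd]
        constructor
        · simp only [List.foldl, stepA, hmod, if_pos, hdiv, hval]
          rw [haltB]
          split_ifs with h
          · rfl
          · congr 1; omega
        · exact ⟨(k : Int) + 1, by omega, by push_cast; omega, hdvd, haltB⟩
      · have hmod : ¬ PySem.Int.mod n ((k : Int) + 1) = 0 := by
          rw [PySem.Int.mod_eq_zero_iff_dvd]; exact hdvd
        have haltB : altGo n (k + 1) = altGo n k := by simp [altGo, hdvd]
        refine ⟨?_, i0, hi0_1, by push_cast; omega, hi0_dvd, by rw [haltB]; exact hval⟩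
        simp [List.foldl, stepA, hdvd, haltB, hval]

-- ===== VERDICT (by name: the statement is the Claim_ definition above) =====
theorem min_sum_of_factors_spec : Claim_equal_min_sum_of_factors := by
  intro n _
  unfold Spec_min_sum_of_factors min_sum_of_factors min_sum_of_factors_alt
  by_cases hle : n ≤ 0
  · simp [hle]
  · have hn : 0 < n := by omega
    simp only [hle, if_false]
    set k : Nat := (Int.sqrt n).toNat with hkdef
    have hsq : Int.sqrt n = Nat.sqrt n.toNat := rfl
    have hk1 : 1 ≤ k := by
      have : 0 < Nat.sqrt n.toNat := Nat.sqrt_pos.mpr (by omega)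
      simp [hkdef, hsq]; omega
    have hkcast : ((k : Int)) = Int.sqrt n := Int.toNat_of_nonneg (Int.sqrt_nonneg n)
    have hkn : (k : Int) * (k : Int) ≤ n := by
      have h1 : Nat.sqrt n.toNat * Nat.sqrt n.toNat ≤ n.toNat := by
        have := Nat.sqrt_le' n.toNat; nlinarith [this]
      have h2 : ((n.toNat : Int)) = n := Int.toNat_of_nonneg (by omega)
      have : ((Nat.sqrt n.toNat * Nat.sqrt n.toNat : Nat) : Int) ≤ ((n.toNat : Nat) : Int) := by
        exact_mod_cast h1
      simp [hkdef, hsq]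
      push_cast at this ⊢
      omega
    obtain ⟨hfold, _⟩ := loop_inv n hn k hk1 hkn
    rw [← hkcast, hfold]
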